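-- pv_equiv track=rewrite | github.com/xu1998hz/llm_self_bias | instruct_ft/generate_eft.py | check_ranking
-- ===== SOURCE A (Python) =====
-- def check_ranking(x, y):
--     assert len(x) == len(y)
--     length = len(x)
--     for i in range(length):
--         for j in range(i + 1, length):
--             # Compare the order of elements in x and y, allowing ties
--             if (x[i] < x[j] and y[i] > y[j]) or (x[i] > x[j] and y[i] < y[j]):
--                 return False
--     return True
-- ===== SOURCE B (Python) =====
-- def check_ranking(x, y):
--     assert len(x) == len(y)
--     ys = [b for _, b in sorted(zip(x, y))]
--     return all(a <= b for a, b in zip(ys, ys[1:]))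
-- ===== Notes on version B (the rewrite author's own statement) =====
-- stated objective: faster
-- what changed: Replaces the quadratic all-pairs scan with a sort: after sorting the (x,y) pairs lexicographically, no discordant pair exists iff the y-sequence is nondecreasing, checked in one linear pass.
import Mathlib
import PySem

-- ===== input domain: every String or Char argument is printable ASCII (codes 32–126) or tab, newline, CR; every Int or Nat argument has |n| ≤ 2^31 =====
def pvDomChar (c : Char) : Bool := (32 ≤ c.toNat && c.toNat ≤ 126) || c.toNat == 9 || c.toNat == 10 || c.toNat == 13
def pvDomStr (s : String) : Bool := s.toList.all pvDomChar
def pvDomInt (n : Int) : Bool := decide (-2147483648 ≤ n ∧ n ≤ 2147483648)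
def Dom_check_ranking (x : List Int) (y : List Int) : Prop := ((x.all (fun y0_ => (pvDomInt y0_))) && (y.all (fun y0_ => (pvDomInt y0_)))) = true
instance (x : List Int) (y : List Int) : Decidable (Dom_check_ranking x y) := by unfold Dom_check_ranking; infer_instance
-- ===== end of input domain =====

-- B replaces A's quadratic all-pairs discordance scan by sorting the (x,y) pairs
-- lexicographically and checking the resulting y-sequence is nondecreasing (O(n log n)).

-- ===== PORT A =====
-- inner loop: 'for j in range(i+1, length): if discordant: return False'
def aInner (x y : List Int) (i : Nat) : List Nat → Bool
  | [] => true
  | j :: js =>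
    if (x.getD i 0 < x.getD j 0 && y.getD j 0 < y.getD i 0)
        || (x.getD j 0 < x.getD i 0 && y.getD i 0 < y.getD j 0) then false
    else aInner x y i js

-- outer loop over i in range(length); a False from the inner loop returns from the function
def aOuter (x y : List Int) (n : Nat) : List Nat → Bool
  | [] => true
  | i :: is => if aInner x y i (List.range' (i + 1) (n - (i + 1))) then aOuter x y n is else false

-- indices produced by range() are in bounds under Pre_, so x[i] is ported as x.getD i 0 (exact there)
def check_ranking (x : List Int) (y : List Int) : Bool :=
  let length := x.length
  aOuter x y length (List.range length)

-- ===== PORT B =====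
def check_ranking_alt (x : List Int) (y : List Int) : Bool :=
  let ys := (PySem.List.sorted2 (x.zip y) Prod.fst Prod.snd).map Prod.snd
  (ys.zip (PySem.List.slice ys (some 1) none)).all (fun p => decide (p.1 ≤ p.2))

-- ===== PRECONDITION & SPEC =====
-- Pre_ excludes exactly the inputs where A's 'assert len(x) == len(y)' raises AssertionError
def Pre_check_ranking (x : List Int) (y : List Int) : Prop := x.length = y.length
instance (x : List Int) (y : List Int) : Decidable (Pre_check_ranking x y) := by unfold Pre_check_ranking; infer_instance

def pvWitness_check_ranking : List Int × List Int := ([1, 2, 2], [5, 3, 7])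

def Spec_check_ranking (x : List Int) (y : List Int) (out : Bool) : Prop := out = check_ranking_alt x y
instance (x : List Int) (y : List Int) (out : Bool) : Decidable (Spec_check_ranking x y out) := by unfold Spec_check_ranking; infer_instance

-- ===== CLAIM (what is proved, stated in full; the proofs are below) =====
def Claim_equal_check_ranking : Prop := ∀ (x : List Int) (y : List Int), Dom_check_ranking x y → Pre_check_ranking x y → Spec_check_ranking x y (check_ranking x y)

-- ===== LEMMAS AND PROOFS =====

-- 'no discordance' between two (x,y) pairs
def Good (p q : Int × Int) : Prop := ¬(p.1 < q.1 ∧ q.2 < p.2) ∧ ¬(q.1 < p.1 ∧ p.2 < q.2)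

-- lexicographic order on pairs (the order sorted2 … fst snd establishes)
def LexLe (p q : Int × Int) : Prop := p.1 < q.1 ∨ (p.1 = q.1 ∧ p.2 ≤ q.2)

def ltB (a b : Int × Int) : Bool :=
  decide (a.1 < b.1) || !decide (b.1 < a.1) && decide (a.2 < b.2)

lemma lexle_of_ltB {a b : Int × Int} (h : ltB a b = true) : LexLe a b := by
  simp [ltB] at h; unfold LexLe; omega

lemma lexle_of_not_ltB {a b : Int × Int} (h : ¬ ltB a b = true) : LexLe b a := by
  simp [ltB] at h; unfold LexLe; omega

lemma lexle_trans {a b c : Int × Int} (h1 : LexLe a b) (h2 : LexLe b c) : LexLe a c := by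
  unfold LexLe at *; omega

lemma insertBy_pairwise (v : Int × Int) :
    ∀ (acc : List (Int × Int)), acc.Pairwise LexLe →
      (PySem.List.insertBy ltB v acc).Pairwise LexLe := by
  intro acc
  induction acc with
  | nil => intro _; simp [PySem.List.insertBy]
  | cons w t ih =>
    intro hp
    rw [List.pairwise_cons] at hp
    obtain ⟨hw, ht⟩ := hp
    show (if ltB v w = true then v :: w :: t else w :: PySem.List.insertBy ltB v t).Pairwise LexLe
    split_ifs with h
    · refine List.Pairwise.cons ?_ (List.Pairwise.cons hw ht)
      intro z hz
      rw [List.mem_cons] at hz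
      rcases hz with rfl | hz
      · exact lexle_of_ltB h
      · exact lexle_trans (lexle_of_ltB h) (hw z hz)
    · refine List.Pairwise.cons ?_ (ih ht)
      intro z hz
      rw [PySem.List.mem_insertBy] at hz
      rcases hz with rfl | hz
      · exact lexle_of_not_ltB h
      · exact hw z hz

lemma sorted2_pairwise_lexle (ps : List (Int × Int)) :
    (PySem.List.sorted2 ps Prod.fst Prod.snd).Pairwise LexLe := by
  show (ps.foldl (fun acc v => PySem.List.insertBy ltB v acc) []).Pairwise LexLe
  have : ∀ (l : List (Int × Int)) (acc : List (Int × Int)), acc.Pairwise LexLe →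
      (l.foldl (fun acc v => PySem.List.insertBy ltB v acc) acc).Pairwise LexLe := by
    intro l
    induction l with
    | nil => intro acc h; simpa using h
    | cons v t ih => intro acc h; exact ih _ (insertBy_pairwise v acc h)
  exact this ps [] (by simp)

-- characterisation of A's inner loop
lemma aInner_iff (x y : List Int) (i : Nat) (js : List Nat) :
    aInner x y i js = true ↔
      ∀ j ∈ js, ¬((x.getD i 0 < x.getD j 0 ∧ y.getD j 0 < y.getD i 0) ∨
                  (x.getD j 0 < x.getD i 0 ∧ y.getD i 0 < y.getD j 0)) := by
  induction js with
  | nil => simp [aInner]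
  | cons j js ih =>
    simp only [aInner]
    rw [List.forall_mem_cons]
    split_ifs with h
    · simp only [Bool.or_eq_true, Bool.and_eq_true, decide_eq_true_eq] at h
      exact iff_of_false (by simp) (fun hc => hc.1 h)
    · simp only [Bool.or_eq_true, Bool.and_eq_true, decide_eq_true_eq] at h
      rw [ih]
      exact (and_iff_right h).symm

lemma aOuter_iff (x y : List Int) (n : Nat) (is : List Nat) :
    aOuter x y n is = true ↔
      ∀ i ∈ is, aInner x y i (List.range' (i + 1) (n - (i + 1))) = true := by
  induction is with
  | nil => simp [aOuter]
  | cons i is ih =>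
    simp only [aOuter]
    split_ifs with h
    · simp [h, ih]
    · simp [h]

lemma checkA_iff (x y : List Int) :
    check_ranking x y = true ↔
      ∀ i j : Nat, i < j → j < x.length →
        ¬((x.getD i 0 < x.getD j 0 ∧ y.getD j 0 < y.getD i 0) ∨
          (x.getD j 0 < x.getD i 0 ∧ y.getD i 0 < y.getD j 0)) := by
  show aOuter x y x.length (List.range x.length) = true ↔ _
  rw [aOuter_iff]
  constructor
  · intro h i j hij hj
    have hi : i ∈ List.range x.length := List.mem_range.mpr (Nat.lt_trans hij hj)
    have := (aInner_iff x y i _).mp (h i hi)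
    exact this j (by rw [List.mem_range']; exact ⟨j - (i+1), by omega⟩)
  · intro h i hi
    rw [aInner_iff]
    intro j hj
    rw [List.mem_range'] at hj
    obtain ⟨k, hk, rfl⟩ := hj
    exact h i _ (by omega) (by omega)

lemma checkA_iff_pairwise (x y : List Int) (hlen : x.length = y.length) :
    check_ranking x y = true ↔ (x.zip y).Pairwise Good := by
  rw [checkA_iff, List.pairwise_iff_getElem]
  have hz : (x.zip y).length = x.length := by simp [List.length_zip, hlen]
  constructor
  · intro h i j hi hj hij
    rw [hz] at hi hj
    have := h i j hij hj
    rw [List.getD_eq_getElem x 0 hj, List.getD_eq_getElem x 0 (Nat.lt_trans hij hj),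
        List.getD_eq_getElem y 0 (by omega), List.getD_eq_getElem y 0 (by omega)] at this
    simp only [List.getElem_zip, Good]
    tauto
  · intro h i j hij hj
    have hi := Nat.lt_trans hij hj
    have := h i j (by omega) (by omega) hij
    simp only [List.getElem_zip, Good] at this
    rw [List.getD_eq_getElem x 0 hj, List.getD_eq_getElem x 0 hi,
        List.getD_eq_getElem y 0 (by omega), List.getD_eq_getElem y 0 (by omega)]
    tauto

lemma good_symm : ∀ {p q : Int × Int}, Good p q → Good q p := by
  intro p q h; unfold Good at *; tauto

-- the adjacent-pairs boolean check is the IsChain predicate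
lemma allAdj_iff (ys : List Int) :
    ((ys.zip (ys.drop 1)).all (fun p => decide (p.1 ≤ p.2)) = true) ↔
      List.IsChain (· ≤ ·) ys := by
  induction ys with
  | nil => simp
  | cons a t ih =>
    cases t with
    | nil => simp
    | cons b t' =>
      simp only [List.drop_one, List.tail_cons, List.zip_cons_cons, List.all_cons,
        List.isChain_cons_cons, Bool.and_eq_true, decide_eq_true_eq]
      rw [← ih]
      simp

lemma pairwise_snd_le_of_good {L : List (Int × Int)}
    (hs : L.Pairwise LexLe) (hg : L.Pairwise Good) :
    (L.map Prod.snd).Pairwise (· ≤ ·) := by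
  rw [List.pairwise_map]
  refine (hs.and hg).imp ?_
  intro a b ⟨h1, h2⟩
  unfold LexLe Good at *
  omega

lemma good_of_pairwise_snd_le {L : List (Int × Int)}
    (hs : L.Pairwise LexLe) (hle : (L.map Prod.snd).Pairwise (· ≤ ·)) :
    L.Pairwise Good := by
  rw [List.pairwise_map] at hle
  refine (hs.and hle).imp ?_
  intro a b ⟨h1, h2⟩
  unfold LexLe Good at *
  omega

-- ===== VERDICT (by name: the statement is the Claim_ definition above) =====
theorem check_ranking_spec : Claim_equal_check_ranking := by
  intro x y _hdom hpre
  unfold Spec_check_ranking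
  rw [Bool.eq_iff_iff]
  set L := PySem.List.sorted2 (x.zip y) Prod.fst Prod.snd with hL
  have hperm : L.Perm (x.zip y) := PySem.List.sorted2_perm _ _ _ _
  have hs : L.Pairwise LexLe := sorted2_pairwise_lexle _
  have halt : check_ranking_alt x y = true ↔ (L.map Prod.snd).Pairwise (· ≤ ·) := by
    show ((L.map Prod.snd).zip
        (PySem.List.slice (L.map Prod.snd) (some 1) none)).all (fun p => decide (p.1 ≤ p.2)) = true ↔ _
    rw [PySem.List.slice_from _ (by norm_num)]
    simp only [show ((1:Int).toNat) = 1 from rfl]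
    rw [allAdj_iff, List.isChain_iff_pairwise]
  rw [halt, checkA_iff_pairwise x y hpre]
  constructor
  · intro h
    exact pairwise_snd_le_of_good hs (h.perm hperm.symm good_symm)
  · intro h
    exact (good_of_pairwise_snd_le hs h).perm hperm good_symm
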